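-- pv_equiv track=rewrite | github.com/martalmeida/okean | okean/nc/ncdump.py | parse_dims
-- ===== SOURCE A (Python) =====
-- from collections import OrderedDict
--
-- def parse_dims(lines):
--   i=-1
--   i0=-1
--   i1=-1
--   while i<len(lines)-1:
--     i+=1
--     if lines[i].lstrip().find('dimensions:')==0: i0=i+1
--     elif (lines[i].lstrip().find('variables:')==0 or\
--            lines[i].lstrip().find('group:')==0 or\
--            lines[i].lstrip().find('} // group ')==0) and i0>-1:
--       i1=i
--       break
--
--   res=OrderedDict()
--   for j in range(i0,i1):
--       tmp=lines[j].split('=')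
--       dimname=tmp[0].strip()
--       dimvalue=tmp[1][:-1].strip()
--       res[dimname]=dimvalue
--
--   return res
-- ===== SOURCE B (Python) =====
-- from collections import OrderedDict
--
-- def parse_dims(lines):
--   inside=False
--   buf=[]
--   for line in lines:
--     s=line.lstrip()
--     if s.startswith('dimensions:'):
--       inside=True
--       buf=[]
--     elif inside and (s.startswith('variables:') or s.startswith('group:') or s.startswith('} // group ')):
--       res=OrderedDict()
--       for entry in buf:
--         tmp=entry.split('=')
--         res[tmp[0].strip()]=tmp[1][:-1].strip()
--       return res
--     elif inside:
--       buf.append(line)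
--   return OrderedDict()
-- ===== Notes on version B (the rewrite author's own statement) =====
-- stated objective: faster
-- what changed: B replaces A's two passes (an index-based scan computing section bounds i0/i1, then re-reading lines[i0:i1] by index) with a single pass over the lines that keeps a state flag and buffers the section's lines, building the dict only when a terminator is hit; it tests prefixes with startswith instead of A's find(...)==0, which scans each whole line.
import Mathlib
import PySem

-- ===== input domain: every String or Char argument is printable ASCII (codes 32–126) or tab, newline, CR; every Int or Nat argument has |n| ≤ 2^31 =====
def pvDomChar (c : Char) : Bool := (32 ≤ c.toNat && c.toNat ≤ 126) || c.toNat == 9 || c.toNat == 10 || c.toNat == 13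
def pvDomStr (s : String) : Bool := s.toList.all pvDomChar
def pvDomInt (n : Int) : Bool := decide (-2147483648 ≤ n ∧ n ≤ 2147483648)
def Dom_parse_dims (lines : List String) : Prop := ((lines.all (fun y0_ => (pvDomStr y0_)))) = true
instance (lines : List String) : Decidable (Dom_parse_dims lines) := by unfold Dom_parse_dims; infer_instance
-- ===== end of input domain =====

-- B replaces A's two passes (index scan for section bounds, then re-reading lines[i0:i1] by index)
-- with one pass holding a state flag and a buffer of section lines (objective: alternative / simpler decomposition).
-- Equivalence of RETURN values; neither version mutates its argument.

-- ===== PORT A =====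
-- lines[i].lstrip().find('dimensions:')==0
def pvIsDimA (l : String) : Bool := PySem.Str.find (PySem.Str.lstrip l) "dimensions:" == 0

def pvIsTermA (l : String) : Bool :=
  (PySem.Str.find (PySem.Str.lstrip l) "variables:" == 0) ||
  (PySem.Str.find (PySem.Str.lstrip l) "group:" == 0) ||
  (PySem.Str.find (PySem.Str.lstrip l) "} // group " == 0)

-- the while loop of A: i runs over the indices of lines; returns (i0, i1)
def pvScanA : List String → Int → Int → Int × Int
  | [], _, i0 => (i0, -1)
  | l :: rest, i, i0 =>
    if pvIsDimA l then pvScanA rest (i + 1) (i + 1)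
    else if pvIsTermA l && decide (i0 > -1) then (i0, i)
    else pvScanA rest (i + 1) i0

-- tmp=lines[j].split('='); dimname=tmp[0].strip(); dimvalue=tmp[1][:-1].strip()
-- (tmp[1] via pyGet?/getD ""; Python raises IndexError there when '=' is absent — excluded by Pre_)
def pvEntryA (l : String) : String × String :=
  let tmp := (PySem.Str.split? l "=").getD []
  (PySem.Str.strip (((PySem.List.pyGet? tmp 0)).getD ""),
   PySem.Str.strip (PySem.Str.slice (((PySem.List.pyGet? tmp 1)).getD "") none (some (-1))))

def parse_dims (lines : List String) : List (String × String) :=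
  let p := pvScanA lines 0 (-1)
  ((PySem.List.pyRange p.1 p.2 1).foldl
    (fun (res : PySem.Dict String String) j =>
      let e := pvEntryA (PySem.List.pyGetD lines j "")
      res.insert e.1 e.2)
    PySem.Dict.empty).items

-- ===== PORT B =====
def pvIsDimB (l : String) : Bool := PySem.Str.startswith (PySem.Str.lstrip l) "dimensions:"

def pvIsTermB (l : String) : Bool :=
  PySem.Str.startswith (PySem.Str.lstrip l) "variables:" ||
  PySem.Str.startswith (PySem.Str.lstrip l) "group:" ||
  PySem.Str.startswith (PySem.Str.lstrip l) "} // group "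

def pvEntryB (l : String) : String × String :=
  let tmp := (PySem.Str.split? l "=").getD []
  (PySem.Str.strip (((PySem.List.pyGet? tmp 0)).getD ""),
   PySem.Str.strip (PySem.Str.slice (((PySem.List.pyGet? tmp 1)).getD "") none (some (-1))))

def pvBuildB (buf : List String) : List (String × String) :=
  (buf.foldl
    (fun (res : PySem.Dict String String) l =>
      let e := pvEntryB l
      res.insert e.1 e.2)
    PySem.Dict.empty).items

-- the single pass with a state flag: some buf = hit a terminator while inside, none = fell off the end
def pvScanB : List String → Bool → List String → Option (List String)
  | [], _, _ => none
  | l :: rest, inside, buf =>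
    if pvIsDimB l then pvScanB rest true []
    else if inside && pvIsTermB l then some buf
    else if inside then pvScanB rest true (buf ++ [l])
    else pvScanB rest inside buf

def parse_dims_alt (lines : List String) : List (String × String) :=
  match pvScanB lines false [] with
  | some buf => pvBuildB buf
  | none => []

-- ===== PRECONDITION & SPEC =====
-- the dimension section A actually parses: lines strictly after the last 'dimensions:' line
-- that precedes the first terminator line coming after the first 'dimensions:' line
def pvPreWindow (lines : List String) : List String :=
  match lines.findIdx? (fun l => pvIsDimB l) with
  | none => []
  | some d =>
    match (lines.drop (d + 1)).findIdx? (fun l => pvIsTermB l) with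
    | none => []
    | some k =>
      ((lines.take (d + 1 + k)).reverse.takeWhile (fun l => !(pvIsDimB l))).reverse

-- Pre_ excludes exactly the inputs on which Python A raises IndexError:
-- a line of the parsed dimension section that contains no '=' (B raises there too).
def Pre_parse_dims (lines : List String) : Prop :=
  ∀ l ∈ pvPreWindow lines, PySem.Str.isIn "=" l = true
instance (lines : List String) : Decidable (Pre_parse_dims lines) := by unfold Pre_parse_dims; infer_instance

def pvWitness_parse_dims : List String :=
  ["dimensions:", "  lon = 10 ;", "  time = UNLIMITED ;", "variables:", "  float x(lon) ;"]

def Spec_parse_dims (lines : List String) (out : List (String × String)) : Prop := out = parse_dims_alt lines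
instance (lines : List String) (out : List (String × String)) : Decidable (Spec_parse_dims lines out) := by unfold Spec_parse_dims; infer_instance

-- ===== CLAIM (what is proved, stated in full; the proofs are below) =====
def Claim_equal_parse_dims : Prop := ∀ (lines : List String), Dom_parse_dims lines → Pre_parse_dims lines → Spec_parse_dims lines (parse_dims lines)

-- ===== LEMMAS AND PROOFS =====

-- s.find(p) == 0 is s.startswith(p)
theorem pvFindZero (s p : List Char) : (PySem.Chars.find s p == 0) = PySem.Chars.startswith s p := by
  have h : PySem.Chars.find s p = 0 ↔ p <+: s := by
    constructor
    · intro h0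
      have hnn : (0:Int) ≤ PySem.Chars.find s p := by omega
      have := (PySem.Chars.find_spec (s := s) (sub := p) hnn).1
      simpa [h0] using this
    · intro hp
      have hnn : (0:Int) ≤ PySem.Chars.find s p :=
        (PySem.Chars.find_nonneg_iff (s := s) (sub := p)).mpr hp.isInfix
      have hsp := PySem.Chars.find_spec (s := s) (sub := p) hnn
      by_contra hne
      have hpos : 0 < (PySem.Chars.find s p).toNat := by omega
      exact (hsp.2 0 hpos) (by simpa using hp)
  have hs : PySem.Chars.startswith s p = true ↔ p <+: s :=
    PySem.Chars.startswith_iff s p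
  by_cases hp : p <+: s
  · simp [h.mpr hp, hs.mpr hp]
  · have h1 : PySem.Chars.find s p ≠ 0 := fun hc => hp (h.mp hc)
    have h2 : PySem.Chars.startswith s p = false := by
      cases hb : PySem.Chars.startswith s p
      · rfl
      · exact absurd (hs.mp hb) hp
    simp [h1, h2]

theorem pvIsDim_eq (l : String) : pvIsDimA l = pvIsDimB l := by
  simp [pvIsDimA, pvIsDimB, pvFindZero]

theorem pvIsTerm_eq (l : String) : pvIsTermA l = pvIsTermB l := by
  simp [pvIsTermA, pvIsTermB, pvFindZero]

theorem pvTakeSucc (full rest' : List String) (k n : Nat) (l : String)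
    (hk : k ≤ n) (hl : full.drop n = l :: rest') :
    ((full.drop k).take (n - k)) ++ [l] = (full.drop k).take (n + 1 - k) := by
  have hlen : n < full.length := by
    by_contra hc
    have : full.drop n = [] := List.drop_eq_nil_of_le (by omega)
    simp [this] at hl
  have h1 : n + 1 - k = (n - k) + 1 := by omega
  rw [h1, List.take_add_one]
  have h3 : full[n]? = some l := by
    have h4 : (full.drop n)[0]? = some l := by rw [hl]; rfl
    rw [List.getElem?_drop] at h4
    simpa using h4
  have h2 : (full.drop k)[n - k]? = some l := by
    rw [List.getElem?_drop]
    have h5 : k + (n - k) = n := by omega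
    rw [h5, h3]
  rw [h2]
  rfl

-- the main induction: A's index scan and B's buffering scan agree
theorem pvScan_rel (rest : List String) :
    ∀ (full : List String) (n : Nat) (i0 : Int) (buf : List String),
    rest = full.drop n →
    (i0 = -1 ∨ ∃ k : Nat, i0 = (k : Int) ∧ k ≤ n ∧ buf = (full.drop k).take (n - k)) →
    ((∃ b, pvScanB rest (decide (i0 > -1)) buf = some b ∧
        ∃ k m : Nat, pvScanA rest (n : Int) i0 = ((k : Int), (m : Int)) ∧ k ≤ m ∧ m ≤ full.length ∧
          b = (full.drop k).take (m - k))
     ∨ (pvScanB rest (decide (i0 > -1)) buf = none ∧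
        (pvScanA rest (n : Int) i0).2 = -1 ∧ -1 ≤ (pvScanA rest (n : Int) i0).1)) := by
  induction rest with
  | nil =>
    intro full n i0 buf hrest hinv
    right
    refine ⟨rfl, by simp [pvScanA], ?_⟩
    simp only [pvScanA]
    rcases hinv with h0 | ⟨k, hk0, _, _⟩ <;> omega
  | cons l rest' ih =>
    intro full n i0 buf hrest hinv
    have hlen : n < full.length := by
      by_contra hc
      have hnil : full.drop n = [] := List.drop_eq_nil_of_le (by omega)
      rw [hnil] at hrest
      simp at hrest
    have hrest' : rest' = full.drop (n + 1) := by
      have h5 : (full.drop n).tail = full.drop (n + 1) := by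
        rw [List.tail_drop]
      rw [← h5, ← hrest]
      rfl
    have hcast : ((n : Int) + 1) = ((n + 1 : Nat) : Int) := by push_cast; ring
    by_cases hd : pvIsDimB l
    · -- dimensions: line — A sets i0 := i+1, B resets the buffer
      have hda : pvIsDimA l = true := by rw [pvIsDim_eq]; exact hd
      have hA : pvScanA (l :: rest') (n : Int) i0 = pvScanA rest' ((n + 1 : Nat) : Int) ((n + 1 : Nat) : Int) := by
        simp only [pvScanA, hda, if_true]
        rw [hcast]
      have hB : pvScanB (l :: rest') (decide (i0 > -1)) buf = pvScanB rest' true [] := by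
        simp [pvScanB, hd]
      rw [hA, hB]
      have h6 : decide (((n + 1 : Nat) : Int) > -1) = true := by simp
      have h7 := ih full (n + 1) ((n + 1 : Nat) : Int) [] hrest'
        (Or.inr ⟨n + 1, rfl, le_refl _, by simp⟩)
      rw [h6] at h7
      exact h7
    · have hda : pvIsDimA l = false := by rw [pvIsDim_eq]; simp [hd]
      rcases hinv with h0 | ⟨k, hk0, hkn, hbuf⟩
      · -- not inside: both just advance
        have hA : pvScanA (l :: rest') (n : Int) i0 = pvScanA rest' ((n + 1 : Nat) : Int) (-1) := by
          simp only [pvScanA, hda, h0, Bool.false_eq_true, if_false]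
          rw [hcast]
          simp
        have hB : pvScanB (l :: rest') (decide (i0 > -1)) buf = pvScanB rest' false buf := by
          simp [pvScanB, hd, h0]
        rw [hA, hB]
        have h7 := ih full (n + 1) (-1) buf hrest' (Or.inl rfl)
        simpa using h7
      · have hky : (-1 : Int) < (k : Int) := by omega
        by_cases ht : pvIsTermB l
        · -- terminator while inside: A breaks with (i0, n); B returns its buffer
          left
          have hta : pvIsTermA l = true := by rw [pvIsTerm_eq]; exact ht
          refine ⟨buf, ?_, k, n, ?_, hkn, le_of_lt hlen, hbuf⟩
          · simp [pvScanB, hd, ht, hk0, hky]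
          · simp only [pvScanA, hda, Bool.false_eq_true, if_false, hk0, hta]
            simp [hky]
        · -- ordinary line while inside: B buffers it
          have hta : pvIsTermA l = false := by rw [pvIsTerm_eq]; simp [ht]
          have hA : pvScanA (l :: rest') (n : Int) i0 = pvScanA rest' ((n + 1 : Nat) : Int) ((k : Nat) : Int) := by
            simp only [pvScanA, hda, hta, hk0, Bool.false_eq_true, if_false, Bool.false_and]
            rw [hcast]
          have hB : pvScanB (l :: rest') (decide (i0 > -1)) buf = pvScanB rest' true (buf ++ [l]) := by
            simp [pvScanB, hd, ht, hk0, hky]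
          rw [hA, hB]
          have hbuf' : buf ++ [l] = (full.drop k).take (n + 1 - k) := by
            rw [hbuf]
            exact pvTakeSucc full rest' k n l hkn hrest.symm
          have h6 : decide (((k : Nat) : Int) > -1) = true := by simpa using hky
          have h7 := ih full (n + 1) ((k : Nat) : Int) (buf ++ [l]) hrest'
            (Or.inr ⟨k, rfl, by omega, hbuf'⟩)
          rw [h6] at h7
          exact h7

theorem pvEntry_eq : pvEntryA = pvEntryB := rfl

-- ===== VERDICT (by name: the statement is the Claim_ definition above) =====
theorem parse_dims_spec : Claim_equal_parse_dims := by
  intro lines _ _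
  unfold Spec_parse_dims
  have h := pvScan_rel lines lines 0 (-1) [] (by simp) (Or.inl rfl)
  simp only [Nat.cast_zero, show decide ((-1 : Int) > -1) = false from rfl] at h
  rcases h with ⟨b, hB, k, m, hA, hkm, hmlen, hb⟩ | ⟨hB, hA2, hA1⟩
  · -- a terminator was found: both sides parse the window lines[  k:m]
    simp only [parse_dims, parse_dims_alt, hA, hB]
    have hstep : (PySem.List.pyRange (k : Int) (m : Int) 1).foldl
        (fun (res : PySem.Dict String String) j =>
          let e := pvEntryA (PySem.List.pyGetD lines j "")
          res.insert e.1 e.2) PySem.Dict.empty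
        = (PySem.List.pyRange (k : Int) (m : Int) 1).foldl
        (fun (res : PySem.Dict String String) j =>
          let e := pvEntryA (PySem.List.pyGetD (lines.take m) j "")
          res.insert e.1 e.2) PySem.Dict.empty := by
      apply PySem.List.foldl_congr_mem
      intro acc j hj
      have hjr := (PySem.List.mem_pyRange_one (a := (k : Int)) (b := (m : Int)) (x := j)).mp hj
      have hj0 : 0 ≤ j := by omega
      have hjlt : j < (lines.length : Int) := by
        have : (m : Int) ≤ (lines.length : Int) := by exact_mod_cast hmlen
        omega
      have h1 : PySem.List.pyGetD lines j "" = lines[j.toNat] :=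
        PySem.List.pyGetD_eq_getElem lines "" hj0 hjlt
      have hjm : j.toNat < m := by omega
      have hjlen : j.toNat < lines.length := by omega
      have htm : (lines.take m).length = m := by
        rw [List.length_take]
        omega
      have h2 : PySem.List.pyGetD (lines.take m) j "" = (lines.take m)[j.toNat] := by
        apply PySem.List.pyGetD_eq_getElem (lines.take m) "" hj0
        rw [htm]
        exact_mod_cast hjr.2
      rw [h1, h2]
      simp [List.getElem_take]
    rw [hstep]
    have hmlen' : ((m : Int)) = ((lines.take m).length : Int) := by
      rw [List.length_take]
      omega
    rw [hmlen']
    rw [PySem.List.foldl_pyRange_pyGetD' (lines.take m) ""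
      (fun (res : PySem.Dict String String) l =>
        let e := pvEntryA l
        res.insert e.1 e.2) PySem.Dict.empty (a := (k : Int)) (by omega)]
    have hdt : ((lines.take m).drop ((k : Int)).toNat) = b := by
      rw [hb]
      simp [List.drop_take]
    rw [hdt, pvBuildB, pvEntry_eq]
  · -- no terminator: A's range is empty, B returns the empty dict
    simp only [parse_dims, parse_dims_alt, hB]
    have hnil : PySem.List.pyRange (pvScanA lines 0 (-1)).1 (pvScanA lines 0 (-1)).2 1 = [] := by
      rw [hA2]
      exact PySem.List.pyRange_one_eq_nil hA1
    rw [hnil]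
    rfl
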